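-- pv_equiv track=rewrite | github.com/manu-palmero/apuntes | public/Estudios/Universidad/Programación/1/Python/Tarea/1---Interacción-con-el-Usuario-en-Python/Código/15.py | nueve
-- ===== SOURCE A (Python) =====
-- def cadenaPositivaDeUnNum(
--     n: int,
-- ):  # Función que devuelve una cadena que contiene un número positivo a pesar de que sea negativo, se utilizará para contar la cantidad de caracteres sin que moleste el signo
--     c: str
--     if n < 0:
--         n = n + (-n * 2)
--         c = str(n)
--     else:
--         c = str(n)
--     return n, c
--
-- def nueve(
--     n: int,
-- ) -> bool:  # Función que comprueba si el número ingresado es divisible por nueve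
--     n, c = cadenaPositivaDeUnNum(n)
--     l = len(c)
--     a = 0
--     for i in range(0, l):
--         a = a + int(c[i])
--     if a == 9 or a % 9 == 0:
--         return True
--     else:
--         return False
-- ===== SOURCE B (Python) =====
-- def nueve(n: int) -> bool:
--     # A number is divisible by 9 iff its digit sum is; Python's % already
--     # yields a non-negative remainder, so no abs/string handling is needed.
--     return n % 9 == 0
-- ===== Notes on version B (the rewrite author's own statement) =====
-- stated objective: simpler
-- what changed: Replaces the string conversion, sign-flip helper and per-digit summing loop with the closed-form divisibility test n % 9 == 0, using that a number's digit sum is congruent to it mod 9.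
import Mathlib
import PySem

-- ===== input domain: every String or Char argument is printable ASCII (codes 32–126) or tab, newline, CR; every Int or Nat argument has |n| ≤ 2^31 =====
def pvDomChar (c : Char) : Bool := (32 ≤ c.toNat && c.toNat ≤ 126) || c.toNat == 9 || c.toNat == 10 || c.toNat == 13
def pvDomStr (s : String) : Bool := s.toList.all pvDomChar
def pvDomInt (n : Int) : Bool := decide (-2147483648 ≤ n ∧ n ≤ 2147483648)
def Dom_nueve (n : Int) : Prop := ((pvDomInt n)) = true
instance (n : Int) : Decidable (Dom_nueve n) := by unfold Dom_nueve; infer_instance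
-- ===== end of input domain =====

-- B replaces A's abs helper, string conversion and per-digit summing loop with the closed form n % 9 == 0 (simpler; digit sum ≡ n mod 9).

-- ===== PORT A =====
-- int(c[i]) applied to one character of the decimal string; the .getD 0 is a
-- totality default never reached on the digit characters str(n) produces.
def pyIntOfChar (ch : Char) : Int := (PySem.Int.ofStr? (String.singleton ch)).getD 0

def cadenaPositivaDeUnNum (n : Int) : Int × String :=
  if n < 0 then
    let n' := n + (-n * 2)
    (n', PySem.Int.toStr n')
  else
    (n, PySem.Int.toStr n)

def nueve (n : Int) : Bool :=
  let nc := cadenaPositivaDeUnNum n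
  let c := nc.2
  let l := PySem.Str.len c
  let a := (PySem.List.pyRange 0 l).foldl
    (fun a i => a + pyIntOfChar ((PySem.Str.pyGet? c i).getD ' ')) 0
  if a == 9 || PySem.Int.mod a 9 == 0 then true else false

-- ===== PORT B =====
def nueve_alt (n : Int) : Bool := PySem.Int.mod n 9 == 0

-- ===== PRECONDITION & SPEC =====
def Spec_nueve (n : Int) (out : Bool) : Prop := out = nueve_alt n
instance (n : Int) (out : Bool) : Decidable (Spec_nueve n out) := by unfold Spec_nueve; infer_instance

-- ===== CLAIM (what is proved, stated in full; the proofs are below) =====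
def Claim_equal_nueve : Prop := ∀ (n : Int), Dom_nueve n → Spec_nueve n (nueve n)

-- ===== LEMMAS AND PROOFS =====

theorem pyIntOfChar_digitChar (d : Nat) (h : d < 10) :
    pyIntOfChar (Nat.digitChar d) = (d : Int) := by
  interval_cases d <;> decide

-- the index loop over a character list equals the plain sum of the digit values
theorem foldl_idx_eq_sum (cs : List Char) :
    (PySem.List.pyRange 0 (cs.length : Int)).foldl
      (fun a i => a + pyIntOfChar ((PySem.Chars.pyGet? cs i).getD ' ')) 0
    = (cs.map pyIntOfChar).sum := by
  induction cs using List.reverseRecOn with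
  | nil => simp [PySem.List.pyRange]
  | append_singleton ds x ih =>
    have hlen : (((ds ++ [x]).length : Nat) : Int) = (ds.length : Int) + 1 := by simp
    rw [hlen, PySem.List.pyRange_one_append 0 (ds.length : Int) ((ds.length : Int) + 1)
      (by positivity) (by omega), List.foldl_append]
    have hcongr : List.foldl
        (fun a i => a + pyIntOfChar ((PySem.Chars.pyGet? (ds ++ [x]) i).getD ' ')) 0
        (PySem.List.pyRange 0 (ds.length : Int))
      = List.foldl (fun a i => a + pyIntOfChar ((PySem.Chars.pyGet? ds i).getD ' ')) 0
        (PySem.List.pyRange 0 (ds.length : Int)) := by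
      apply PySem.List.foldl_congr_mem
      intro acc i hi
      rw [PySem.List.mem_pyRange_one] at hi
      have hk : i = ((i.toNat : Nat) : Int) := by omega
      have hklt : i.toNat < ds.length := by omega
      simp only [PySem.Chars.pyGet?]
      rw [hk, PySem.List.pyGet?_natCast, PySem.List.pyGet?_natCast,
        List.getElem?_append_left hklt]
    rw [hcongr, ih]
    have hsing : PySem.List.pyRange (ds.length : Int) ((ds.length : Int) + 1)
        = [(ds.length : Int)] := by
      rw [PySem.List.pyRange_one_cons (by omega)]
      have : PySem.List.pyRange ((ds.length : Int) + 1) ((ds.length : Int) + 1) = [] := by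
        simp [PySem.List.pyRange]
      rw [this]
    rw [hsing]
    simp [PySem.Chars.pyGet?]

-- digit sum of Nat.toDigitsCore is congruent mod 9 to the number plus the tail's sum
theorem toDigitsCore_sum_mod (fuel : Nat) :
    ∀ (n : Nat) (ds : List Char), n < fuel →
      ((Nat.toDigitsCore 10 fuel n ds).map pyIntOfChar).sum ≡
        (n : Int) + ((ds.map pyIntOfChar).sum) [ZMOD 9] := by
  induction fuel with
  | zero => intro n ds h; omega
  | succ f ih =>
    intro n ds h
    rw [Nat.toDigitsCore]
    by_cases h0 : n / 10 = 0
    · simp only [h0, if_pos]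
      have hlt : n < 10 := by omega
      simp only [List.map_cons, List.sum_cons, Nat.mod_eq_of_lt hlt,
        pyIntOfChar_digitChar n hlt]
      exact Int.ModEq.refl _
    · rw [if_neg h0]
      have hfd : n / 10 < f := by omega
      have hrec := ih (n / 10) ((n % 10).digitChar :: ds) hfd
      refine hrec.trans ?_
      simp only [List.map_cons, List.sum_cons, pyIntOfChar_digitChar (n % 10) (by omega)]
      exact Int.ModEq.symm (Int.modEq_iff_dvd.mpr (by omega))

theorem toDigits_sum_mod (m : Nat) :
    ((Nat.toDigits 10 m).map pyIntOfChar).sum ≡ (m : Int) [ZMOD 9] := by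
  have := toDigitsCore_sum_mod (m + 1) m [] (Nat.lt_succ_self m)
  simpa [Nat.toDigits] using this

-- A's digit-sum loop over str(v), for nonnegative v, is congruent to v mod 9
theorem nueve_body (v : Int) (hv : 0 ≤ v) :
    (PySem.List.pyRange 0 (PySem.Str.len (PySem.Int.toStr v))).foldl
      (fun a i => a + pyIntOfChar ((PySem.Str.pyGet? (PySem.Int.toStr v) i).getD ' ')) 0
    ≡ v [ZMOD 9] := by
  have hlist : (PySem.Int.toStr v).toList = Nat.toDigits 10 v.toNat := by
    rw [PySem.Int.toList_toStr, PySem.Int.toChars, if_neg (by omega)]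
  simp only [PySem.Str.len, PySem.Str.pyGet?, hlist]
  rw [foldl_idx_eq_sum]
  have := toDigits_sum_mod v.toNat
  rwa [Int.toNat_of_nonneg hv] at this

theorem nueve_eq_alt (n : Int) : nueve n = nueve_alt n := by
  have key : ∀ v : Int, 0 ≤ v → (v % 9 = 0 ↔ n % 9 = 0) →
      (let c := PySem.Int.toStr v
       let a := (PySem.List.pyRange 0 (PySem.Str.len c)).foldl
         (fun a i => a + pyIntOfChar ((PySem.Str.pyGet? c i).getD ' ')) 0
       if a == 9 || PySem.Int.mod a 9 == 0 then true else false) = nueve_alt n := by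
    intro v hv hmod
    have h' : ((PySem.List.pyRange 0 (PySem.Str.len (PySem.Int.toStr v))).foldl
      (fun a i => a + pyIntOfChar ((PySem.Str.pyGet? (PySem.Int.toStr v) i).getD ' ')) 0) % 9
        = v % 9 := nueve_body v hv
    simp only [nueve_alt, PySem.Int.mod, Int.fmod_eq_emod]
    set a := (PySem.List.pyRange 0 (PySem.Str.len (PySem.Int.toStr v))).foldl
      (fun a i => a + pyIntOfChar ((PySem.Str.pyGet? (PySem.Int.toStr v) i).getD ' ')) 0 with ha
    by_cases hb : n % 9 = 0
    · have : a = 9 ∨ a % 9 = 0 := by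
        have := hmod.mpr hb; omega
      rcases this with h1 | h1 <;> simp [h1, hb]
    · have hv9 : v % 9 ≠ 0 := fun hc => hb (hmod.mp hc)
      have h1 : a ≠ 9 := by omega
      have h2 : a % 9 ≠ 0 := by omega
      simp [h1, h2, hb]
  unfold nueve cadenaPositivaDeUnNum
  by_cases hn : n < 0
  · simp only [if_pos hn]
    exact key (n + -n * 2) (by omega) (by omega)
  · simp only [if_neg hn]
    exact key n (by omega) Iff.rfl

-- ===== VERDICT (by name: the statement is the Claim_ definition above) =====
theorem nueve_spec : Claim_equal_nueve := by
  intro n _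
  exact nueve_eq_alt n
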